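-- pv_equiv track=rewrite | github.com/klausfrieler/melospy | melospy/basic_representations/jm_util.py | is_scale_like
-- ===== SOURCE A (Python) =====
-- from math import atan2, copysign, cos, exp, floor, log, pi, sin, sqrt
--
-- def is_scale_like(vec, transform, directed=False, mode="scale"):
--     supported_transforms = ["interval", "pitch"]
--     if transform not in supported_transforms:
--         raise ValueError("Unsuported transform: {}".format(transform))
--     if len(vec)==0:
--         return False
--
--     #we work on intervals only, so convert pitch to intervals
--     if transform == "pitch":
--         vec = diff(vec)
--
--     #A scale in this sense
--     #consists of a sequence of 2 and 1 semitones intervals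
--     #checking for this discard sign of interval
--     avec = [abs(v) for v in vec]
--     offset = {"scale": 1, "pentatonic": "2", "arpeggio": 3}[mode]
--     elements = sorted(set(avec))
--     for i, e in enumerate(elements):
--         if e != i + offset:
--             return False
--
--     if not directed:
--         return True
--     #if directed is soecified, alls intervals must have the same direction (sign)
--     signs = [copysign(1, k) for k in vec]
--     if abs(sum(signs)) != len(vec):
--         return False
--     return True
--
-- def diff(x):
--     #type_check_vec(x, (int, float))
--
--     d = []
--     if len(x) <= 1:
--         return d
--     for i in range(len(x)-1):
--         d.append(x[i+1]-x[i])
--     return d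
-- ===== SOURCE B (Python) =====
-- def is_scale_like(vec, transform, directed=False, mode="scale"):
--     if transform not in ("interval", "pitch"):
--         raise ValueError("Unsuported transform: {}".format(transform))
--     if not vec:
--         return False
--     offset = {"scale": 1, "pentatonic": 2, "arpeggio": 3}[mode]
--     # single fused pass: thread the previous pitch, maintain the set of
--     # distinct absolute intervals with its min and max, and count the
--     # nonnegative intervals; a size-k set of distinct integers is the
--     # contiguous block starting at `offset` iff min == offset and
--     # max - min + 1 == k (pigeonhole), no sorting needed.
--     seen = set()
--     lo = hi = None
--     nonneg = n = 0
--     prev = None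
--     for x in vec:
--         if transform == "pitch":
--             if prev is None:
--                 prev = x
--                 continue
--             v = x - prev
--             prev = x
--         else:
--             v = x
--         n += 1
--         a = abs(v)
--         if a not in seen:
--             seen.add(a)
--             if lo is None or a < lo:
--                 lo = a
--             if hi is None or a > hi:
--                 hi = a
--         if v >= 0:
--             nonneg += 1
--     if n and (lo != offset or hi - lo + 1 != len(seen)):
--         return False
--     if directed:
--         return nonneg == n or nonneg == 0
--     return True
-- ===== Notes on version B (the rewrite author's own statement) =====
-- stated objective: alternative
-- what changed: B replaces A's staged passes (diff list, abs list, set, sort, enumerate-scan, signs list, sum) by ONE fused loop over vec that threads the previous pitch and maintains the distinct-absolute-interval set with its running min, max and size plus a nonnegative count; contiguity is then decided by the pigeonhole fact min==offset and max-min+1==#distinct instead of sorting and scanning positions.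
import Mathlib
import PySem

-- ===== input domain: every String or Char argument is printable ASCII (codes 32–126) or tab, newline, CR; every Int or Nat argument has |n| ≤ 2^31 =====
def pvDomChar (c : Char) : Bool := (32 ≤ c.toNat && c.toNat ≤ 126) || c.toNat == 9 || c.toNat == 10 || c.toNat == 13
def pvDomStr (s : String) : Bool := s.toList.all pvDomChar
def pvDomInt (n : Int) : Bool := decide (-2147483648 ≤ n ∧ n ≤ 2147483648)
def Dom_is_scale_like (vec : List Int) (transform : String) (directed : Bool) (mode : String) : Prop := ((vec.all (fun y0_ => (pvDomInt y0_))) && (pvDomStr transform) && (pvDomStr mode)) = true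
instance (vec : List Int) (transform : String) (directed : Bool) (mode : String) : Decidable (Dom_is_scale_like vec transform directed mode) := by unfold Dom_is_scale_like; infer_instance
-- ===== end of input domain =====

-- B replaces A's staged passes (diff list, abs list, set, sort, positional scan, signs
-- list, sum) by ONE fused loop threading the previous pitch and maintaining the distinct
-- absolute-interval set with its running min/max/size and a nonnegative count; contiguity
-- is decided by the pigeonhole fact min = offset ∧ max - min + 1 = #distinct, no sorting.

-- ===== PORT A =====
-- helper: literal port of Python `diff` (index loop appending x[i+1]-x[i]; indices always in range)
def pyDiffA (x : List Int) : List Int :=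
  if x.length ≤ 1 then []
  else (PySem.List.pyRange 0 ((x.length : Int) - 1) 1).foldl
        (fun d i => d ++ [PySem.List.pyGetD x (i + 1) 0 - PySem.List.pyGetD x i 0]) []

def is_scale_like (vec : List Int) (transform : String) (directed : Bool) (mode : String) : Bool :=
  if ¬ (transform = "interval" ∨ transform = "pitch") then false  -- Python: ValueError (outside Pre_)
  else if vec.length = 0 then false
  else
    let vec' := if transform = "pitch" then pyDiffA vec else vec
    let avec := vec'.map (fun v => |v|)
    -- dict lookup {"scale":1,"pentatonic":"2","arpeggio":3}[mode]: other modes raise KeyError and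
    -- pentatonic's string "2" raises TypeError in the loop unless the loop is empty — both outside
    -- Pre_; inside Pre_ the pentatonic offset is only ever used with an empty loop, value 2 is inert.
    let offset : Int := if mode = "scale" then 1 else if mode = "arpeggio" then 3 else 2
    let elements := PySem.List.sorted (PySem.Set.ofList avec) (fun x => x) false
    if (PySem.List.enumerate elements 0).any (fun p => decide (p.2 ≠ p.1 + offset)) then false
    else if ¬ directed then true
    else
      let signs := vec'.map (fun k => if 0 ≤ k then (1 : Int) else -1)  -- copysign(1, k)
      if (signs.sum).natAbs ≠ vec'.length then false else true

-- ===== PORT B =====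
-- the fused loop's state: previous pitch, distinct absolute intervals (a set),
-- their running min and max, the count of nonnegative intervals, interval count
structure BState where
  prev : Option Int
  seen : PySem.Set Int
  lo : Option Int
  hi : Option Int
  nonneg : Nat
  n : Nat
  deriving DecidableEq, Repr

-- the loop body once the interval v is in hand
def bUpdate (s : BState) (v : Int) : BState :=
  let a := |v|
  let s1 : BState :=
    if a ∈ s.seen then s
    else { s with seen := PySem.Set.add s.seen a,
                  lo := if s.lo = none ∨ a < s.lo.getD 0 then some a else s.lo,
                  hi := if s.hi = none ∨ s.hi.getD 0 < a then some a else s.hi }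
  { s1 with nonneg := if 0 ≤ v then s1.nonneg + 1 else s1.nonneg, n := s1.n + 1 }

def bStep (transform : String) (s : BState) (x : Int) : BState :=
  if transform = "pitch" then
    match s.prev with
    | none => { s with prev := some x }          -- first pitch: remember it, continue
    | some p => { bUpdate s (x - p) with prev := some x }
  else bUpdate s x

def is_scale_like_alt (vec : List Int) (transform : String) (directed : Bool) (mode : String) : Bool :=
  if ¬ (transform = "interval" ∨ transform = "pitch") then false  -- Python: ValueError (outside Pre_)
  else if vec = [] then false
  else
    let offset : Int := if mode = "scale" then 1 else if mode = "pentatonic" then 2 else 3  -- KeyError outside Pre_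
    let st := vec.foldl (bStep transform) ⟨none, PySem.Set.empty, none, none, 0, 0⟩
    -- pigeonhole contiguity check: min = offset and max - min + 1 = #distinct
    if st.n ≠ 0 ∧ (st.lo ≠ some offset ∨ st.hi.getD 0 - st.lo.getD 0 + 1 ≠ (st.seen.length : Int)) then false
    else if directed then decide (st.nonneg = st.n ∨ st.nonneg = 0)
    else true

-- ===== PRECONDITION & SPEC =====
-- Pre_ excludes exactly the inputs where Python A raises: an unsupported transform (ValueError),
-- a mode outside the offset dict with a nonempty vec (KeyError; an empty vec returns before the
-- lookup), and mode "pentatonic" with a nonempty interval list (TypeError from comparing an int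
-- with the string offset "2").
def Pre_is_scale_like (vec : List Int) (transform : String) (directed : Bool) (mode : String) : Prop :=
  (transform = "interval" ∨ transform = "pitch") ∧
  (vec = [] ∨ mode = "scale" ∨ mode = "arpeggio" ∨
    (mode = "pentatonic" ∧ transform = "pitch" ∧ vec.length ≤ 1))
instance (vec : List Int) (transform : String) (directed : Bool) (mode : String) : Decidable (Pre_is_scale_like vec transform directed mode) := by unfold Pre_is_scale_like; infer_instance

def pvWitness_is_scale_like : List Int × String × Bool × String := ([1, 2, 1, -2], "interval", true, "scale")

def Spec_is_scale_like (vec : List Int) (transform : String) (directed : Bool) (mode : String) (out : Bool) : Prop := out = is_scale_like_alt vec transform directed mode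
instance (vec : List Int) (transform : String) (directed : Bool) (mode : String) (out : Bool) : Decidable (Spec_is_scale_like vec transform directed mode out) := by unfold Spec_is_scale_like; infer_instance

-- ===== CLAIM (what is proved, stated in full; the proofs are below) =====
def Claim_equal_is_scale_like : Prop := ∀ (vec : List Int) (transform : String) (directed : Bool) (mode : String), Dom_is_scale_like vec transform directed mode → Pre_is_scale_like vec transform directed mode → Spec_is_scale_like vec transform directed mode (is_scale_like vec transform directed mode)

-- ===== LEMMAS AND PROOFS =====

-- proof-only canonical state: what B's loop state is after processing interval list l
def canonState (pr : Option Int) (l : List Int) : BState :=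
  { prev := pr,
    seen := PySem.Set.ofList (l.map (fun v => |v|)),
    lo := (l.map (fun v => |v|)).min?,
    hi := (l.map (fun v => |v|)).max?,
    nonneg := l.countP (fun v => decide (0 ≤ v)),
    n := l.length }

-- proof-only structural diff with a threaded previous element
def diffs : Int → List Int → List Int
  | _, [] => []
  | p, x :: t => (x - p) :: diffs x t

def pitchLast (p : Int) (t : List Int) : Int := t.foldl (fun _ x => x) p

theorem min?_app_none (A : List Int) (a : Int) (h : A.min? = none) :
    (A ++ [a]).min? = some a := by
  rw [List.min?_eq_none_iff] at h; simp [h]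

theorem min?_app_some (A : List Int) (a m : Int) (h : A.min? = some m) :
    (A ++ [a]).min? = some (min m a) := by
  obtain ⟨hm, hle⟩ := List.min?_eq_some_iff.mp h
  rw [List.min?_eq_some_iff]
  refine ⟨?_, ?_⟩
  · rcases le_total m a with h' | h'
    · rw [min_eq_left h']; exact List.mem_append.mpr (Or.inl hm)
    · rw [min_eq_right h']; simp
  · intro b hb
    rcases List.mem_append.mp hb with hb | hb
    · exact le_trans (min_le_left m a) (hle b hb)
    · simp at hb; omega

theorem max?_app_none (A : List Int) (a : Int) (h : A.max? = none) :
    (A ++ [a]).max? = some a := by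
  rw [List.max?_eq_none_iff] at h; simp [h]

theorem max?_app_some (A : List Int) (a m : Int) (h : A.max? = some m) :
    (A ++ [a]).max? = some (max m a) := by
  obtain ⟨hm, hle⟩ := List.max?_eq_some_iff.mp h
  rw [List.max?_eq_some_iff]
  refine ⟨?_, ?_⟩
  · rcases le_total m a with h' | h'
    · rw [max_eq_right h']; simp
    · rw [max_eq_left h']; exact List.mem_append.mpr (Or.inl hm)
  · intro b hb
    rcases List.mem_append.mp hb with hb | hb
    · exact le_trans (hle b hb) (le_max_left m a)
    · simp at hb; omega

theorem bUpdate_canon (pr : Option Int) (l : List Int) (v : Int) :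
    bUpdate (canonState pr l) v = canonState pr (l ++ [v]) := by
  have hmap : (l ++ [v]).map (fun w => |w|) = l.map (fun w => |w|) ++ [|v|] := by simp
  unfold bUpdate canonState
  by_cases hmem : |v| ∈ PySem.Set.ofList (l.map (fun w => |w|))
  · have hinl : |v| ∈ l.map (fun w => |w|) := (PySem.Set.mem_ofList _ _).mp hmem
    have e1 : PySem.Set.ofList ((l ++ [v]).map (fun w => |w|))
        = PySem.Set.ofList (l.map (fun w => |w|)) := by
      rw [hmap, PySem.Set.ofList_append_singleton, PySem.Set.add_of_mem hmem]
    obtain ⟨m, hm⟩ : ∃ m, (l.map (fun w => |w|)).min? = some m := by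
      cases h : (l.map (fun w => |w|)).min? with
      | none => rw [List.min?_eq_none_iff] at h; rw [h] at hinl; simp at hinl
      | some m => exact ⟨m, rfl⟩
    obtain ⟨M, hM⟩ : ∃ M, (l.map (fun w => |w|)).max? = some M := by
      cases h : (l.map (fun w => |w|)).max? with
      | none => rw [List.max?_eq_none_iff] at h; rw [h] at hinl; simp at hinl
      | some M => exact ⟨M, rfl⟩
    have e2 : ((l ++ [v]).map (fun w => |w|)).min? = (l.map (fun w => |w|)).min? := by
      rw [hmap, min?_app_some _ _ _ hm, hm,
        min_eq_left ((List.min?_eq_some_iff.mp hm).2 _ hinl)]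
    have e3 : ((l ++ [v]).map (fun w => |w|)).max? = (l.map (fun w => |w|)).max? := by
      rw [hmap, max?_app_some _ _ _ hM, hM,
        max_eq_left ((List.max?_eq_some_iff.mp hM).2 _ hinl)]
    have e4 : (l ++ [v]).countP (fun w => decide (0 ≤ w))
        = (if 0 ≤ v then l.countP (fun w => decide (0 ≤ w)) + 1
           else l.countP (fun w => decide (0 ≤ w))) := by
      by_cases hv : 0 ≤ v <;> simp [List.countP_append, hv]
    have e5 : (l ++ [v]).length = l.length + 1 := by simp
    simp only [if_pos hmem, e1, e2, e3, e4, e5]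
  · have e1 : PySem.Set.ofList ((l ++ [v]).map (fun w => |w|))
        = PySem.Set.add (PySem.Set.ofList (l.map (fun w => |w|))) |v| := by
      rw [hmap, PySem.Set.ofList_append_singleton]
    have e2 : ((l ++ [v]).map (fun w => |w|)).min?
        = (if (l.map (fun w => |w|)).min? = none ∨ |v| < ((l.map (fun w => |w|)).min?).getD 0
           then some |v| else (l.map (fun w => |w|)).min?) := by
      cases h : (l.map (fun w => |w|)).min? with
      | none => rw [hmap, min?_app_none _ _ h]; simp
      | some m =>
        rw [hmap, min?_app_some _ _ _ h]
        by_cases h' : |v| < m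
        · simp [h', min_eq_right (le_of_lt h')]
        · simp [h', min_eq_left (by omega : m ≤ |v|)]
    have e3 : ((l ++ [v]).map (fun w => |w|)).max?
        = (if (l.map (fun w => |w|)).max? = none ∨ ((l.map (fun w => |w|)).max?).getD 0 < |v|
           then some |v| else (l.map (fun w => |w|)).max?) := by
      cases h : (l.map (fun w => |w|)).max? with
      | none => rw [hmap, max?_app_none _ _ h]; simp
      | some M =>
        rw [hmap, max?_app_some _ _ _ h]
        by_cases h' : M < |v|
        · simp [h', max_eq_right (le_of_lt h')]
        · simp [h', max_eq_left (by omega : |v| ≤ M)]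
    have e4 : (l ++ [v]).countP (fun w => decide (0 ≤ w))
        = (if 0 ≤ v then l.countP (fun w => decide (0 ≤ w)) + 1
           else l.countP (fun w => decide (0 ≤ w))) := by
      by_cases hv : 0 ≤ v <;> simp [List.countP_append, hv]
    have e5 : (l ++ [v]).length = l.length + 1 := by simp
    simp only [if_neg hmem, e1, e2, e3, e4, e5]

theorem canon_prev (pr pr' : Option Int) (l : List Int) :
    { canonState pr l with prev := pr' } = canonState pr' l := by
  simp [canonState]

theorem foldl_canon_ne_pitch (transform : String) (hne : transform ≠ "pitch")
    (l : List Int) : ∀ (pr : Option Int) (l0 : List Int),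
    l.foldl (bStep transform) (canonState pr l0) = canonState pr (l0 ++ l) := by
  induction l with
  | nil => intro pr l0; simp
  | cons x t ih =>
    intro pr l0
    simp only [List.foldl_cons, bStep, if_neg hne, bUpdate_canon]
    rw [ih pr (l0 ++ [x])]
    simp

theorem foldl_canon_pitch (t : List Int) : ∀ (p : Int) (l0 : List Int),
    t.foldl (bStep "pitch") (canonState (some p) l0)
      = canonState (some (pitchLast p t)) (l0 ++ diffs p t) := by
  induction t with
  | nil => intro p l0; simp [pitchLast, diffs]
  | cons x t ih =>
    intro p l0
    have hstep : bStep "pitch" (canonState (some p) l0) x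
        = canonState (some x) (l0 ++ [x - p]) := by
      simp only [bStep]
      show { bUpdate (canonState (some p) l0) (x - p) with prev := some x } = _
      rw [bUpdate_canon, canon_prev]
    simp only [List.foldl_cons, hstep]
    rw [ih x (l0 ++ [x - p])]
    simp [pitchLast, diffs]

theorem canon_init : canonState none [] = ⟨none, PySem.Set.empty, none, none, 0, 0⟩ := by
  simp [canonState, PySem.Set.empty, PySem.Set.ofList]

-- A's index-based diff equals the zip of adjacent pairs
theorem pyDiffA_eq_zip (x : List Int) :
    pyDiffA x = (x.zip x.tail).map (fun p => p.2 - p.1) := by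
  unfold pyDiffA
  split
  · rename_i h
    rcases x with _ | ⟨a, _ | _⟩ <;> simp_all
  · rename_i h
    rw [not_le] at h
    rw [PySem.List.foldl_append_singleton_eq_map]
    have hc : (x.length : Int) - 1 = ((x.length - 1 : Nat) : Int) := by omega
    rw [hc, PySem.List.pyRange_zero_nat]
    apply List.ext_getElem
    · simp
    · intro i h1 h2
      simp at h1
      have hi1 : i + 1 < x.length := by omega
      have hi : i < x.length := by omega
      simp [List.getElem_zip, List.getElem_tail]
      have e1 : ((i:Int) + 1) = ((i+1 : Nat) : Int) := by push_cast; ring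
      simp [List.getElem?_eq_getElem hi]
      rw [e1, PySem.List.pyGetD_natCast, List.getD_eq_getElem x 0 hi1]

theorem diffs_eq_zip (t : List Int) : ∀ p : Int,
    diffs p t = ((p :: t).zip t).map (fun q => q.2 - q.1) := by
  induction t with
  | nil => intro p; simp [diffs]
  | cons x t ih => intro p; simp [diffs, ih x]

-- A's sign sum counts nonnegative entries: sum = 2·countP(0 ≤ ·) − length
theorem sum_signs (v : List Int) :
    (v.map (fun k => if 0 ≤ k then (1 : Int) else -1)).sum
      = 2 * (v.countP (fun k => decide (0 ≤ k)) : Int) - v.length := by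
  induction v with
  | nil => simp
  | cons a t ih =>
    simp only [List.map_cons, List.sum_cons, List.countP_cons, List.length_cons, ih]
    by_cases h : (0:Int) ≤ a <;> simp [h] <;> ring

-- a strictly increasing Int list grows at least by 1 per position
theorem pairwise_lt_getElem_le (E : List Int) (hp : E.Pairwise (· < ·))
    (i j : Nat) (hi : i < E.length) (hj : j < E.length) (hij : i ≤ j) :
    E[i] + ((j : Int) - i) ≤ E[j] := by
  induction j, hij using Nat.le_induction with
  | base =>
    have h : ((i : Int) - i) = 0 := by ring
    rw [h, add_zero]
  | succ j hij ih =>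
    have h1 : j < E.length := by omega
    have h2 := List.pairwise_iff_getElem.mp hp j (j + 1) h1 hj (Nat.lt_succ_self j)
    have h3 := ih h1
    push_cast at h3 ⊢
    omega

-- A's sorted positional scan is false exactly when sorted(set(avec)) IS the contiguous range
theorem scan_iff_eq_range (a : List Int) (off : Int) :
    ((PySem.List.enumerate (PySem.List.sorted (PySem.Set.ofList a) (fun x => x) false) 0).any
        (fun p => decide (p.2 ≠ p.1 + off)) = false)
      ↔ PySem.List.sorted (PySem.Set.ofList a) (fun x => x) false
          = PySem.List.pyRange off (off + ((PySem.Set.ofList a).length : Int)) 1 := by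
  set s := PySem.Set.ofList a with hs
  set E := PySem.List.sorted s (fun x => x) false with hE
  have hlen : E.length = s.length := PySem.List.length_sorted ..
  have hRn : (PySem.List.pyRange off (off + (s.length : Int)) 1).length = s.length := by
    rw [PySem.List.length_pyRange_one]; omega
  rw [List.any_eq_false]
  constructor
  · intro h
    apply List.ext_getElem (by omega)
    intro k hk1 hk2
    have := h ((0:Int)+k, E[k]) (by rw [PySem.List.mem_enumerate_iff]; exact ⟨k, hk1, rfl⟩)
    simp at this
    rw [PySem.List.getElem_pyRange_one]
    omega
  · intro h p hp
    rw [PySem.List.mem_enumerate_iff] at hp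
    obtain ⟨k, hk, rfl⟩ := hp
    simp [h, PySem.List.getElem_pyRange_one, add_comm]

-- the range identity is exactly B's min/max/size pigeonhole condition
theorem range_iff_minmax (a : List Int) (off : Int) (ha : a ≠ []) :
    (PySem.List.sorted (PySem.Set.ofList a) (fun x => x) false
        = PySem.List.pyRange off (off + ((PySem.Set.ofList a).length : Int)) 1)
      ↔ (a.min? = some off ∧
          (a.max?).getD 0 - (a.min?).getD 0 + 1 = ((PySem.Set.ofList a).length : Int)) := by
  set s := PySem.Set.ofList a with hs
  set E := PySem.List.sorted s (fun x => x) false with hE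
  have hlen : E.length = s.length := PySem.List.length_sorted ..
  have hmemE : ∀ x : Int, x ∈ E ↔ x ∈ a := by
    intro x
    rw [hE, PySem.List.mem_sorted, hs, PySem.Set.mem_ofList]
  have hNpos : 0 < s.length := by
    obtain ⟨y, hy⟩ : ∃ y, y ∈ a := by
      cases a with | nil => simp at ha | cons y t => exact ⟨y, by simp⟩
    have : y ∈ E := (hmemE y).mpr hy
    have := List.length_pos_of_mem this
    omega
  have hEp : E.Pairwise (· < ·) := PySem.List.sorted_ofList_pairwise_lt ..
  constructor
  · intro h
    have hmin : a.min? = some off := by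
      rw [List.min?_eq_some_iff]
      constructor
      · rw [← hmemE, h, PySem.List.mem_pyRange_one]; omega
      · intro b hb
        have : b ∈ E := (hmemE b).mpr hb
        rw [h, PySem.List.mem_pyRange_one] at this
        omega
    have hmax : a.max? = some (off + s.length - 1) := by
      rw [List.max?_eq_some_iff]
      constructor
      · rw [← hmemE, h, PySem.List.mem_pyRange_one]; omega
      · intro b hb
        have : b ∈ E := (hmemE b).mpr hb
        rw [h, PySem.List.mem_pyRange_one] at this
        omega
    refine ⟨hmin, ?_⟩
    rw [hmin, hmax]
    simp only [Option.getD_some]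
    omega
  · rintro ⟨hmin, harith⟩
    obtain ⟨hoffmem, hoffle⟩ := List.min?_eq_some_iff.mp hmin
    cases hmx : a.max? with
    | none => rw [List.max?_eq_none_iff] at hmx; exact absurd hmx ha
    | some hiv =>
      obtain ⟨hhimem, hhile⟩ := List.max?_eq_some_iff.mp hmx
      rw [hmin, hmx] at harith
      simp at harith
      have hlen0 : 0 < E.length := by omega
      have hlenl : s.length - 1 < E.length := by omega
      have hmono2 : ∀ (p q : Nat) (hpq : p ≤ q) (hq : q < E.length),
          E[p]'(lt_of_le_of_lt hpq hq) ≤ E[q]'hq :=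
        fun p q hpq hq => PySem.List.sorted_id_getElem_mono s hpq hq
      have h0mem : E[0]'hlen0 ∈ a := (hmemE _).mp (List.getElem_mem _)
      have hlastmem : E[s.length - 1]'hlenl ∈ a := (hmemE _).mp (List.getElem_mem _)
      obtain ⟨j, hj, hje⟩ := List.getElem_of_mem ((hmemE off).mpr hoffmem)
      obtain ⟨j', hj', hje'⟩ := List.getElem_of_mem ((hmemE hiv).mpr hhimem)
      have h0 : E[0]'hlen0 = off := by
        have h1 := hoffle _ h0mem
        have h2 := hmono2 0 j (Nat.zero_le j) hj
        rw [hje] at h2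
        have h2' : E[0]'hlen0 ≤ off := h2
        exact le_antisymm h2' h1
      have hlast : E[s.length - 1]'hlenl = hiv := by
        have h1 := hhile _ hlastmem
        have h2 := hmono2 j' (s.length - 1) (by omega) hlenl
        rw [hje'] at h2
        exact le_antisymm h1 h2
      apply List.ext_getElem
      · rw [hlen, PySem.List.length_pyRange_one]; omega
      · intro k hk1 hk2
        rw [PySem.List.getElem_pyRange_one]
        have hge := pairwise_lt_getElem_le E hEp 0 k hlen0 hk1 (Nat.zero_le k)
        have hle' := pairwise_lt_getElem_le E hEp k (s.length - 1) hk1 hlenl (by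
          rw [hlen] at hk1
          omega)
        rw [h0] at hge
        rw [hlast] at hle'
        push_cast at hge hle' ⊢
        omega

-- ===== VERDICT (by name: the statement is the Claim_ definition above) =====

theorem is_scale_like_spec : Claim_equal_is_scale_like := by
  intro vec transform directed mode hdom hpre
  obtain ⟨ht, hm2⟩ := hpre
  unfold Spec_is_scale_like
  simp only [is_scale_like, is_scale_like_alt]
  rw [if_neg (not_not_intro ht), if_neg (not_not_intro ht)]
  by_cases hv : vec = []
  · simp [hv]
  · have hm := hm2.resolve_left hv
    rw [if_neg (by simpa [List.length_eq_zero_iff] using hv), if_neg hv]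
    have hoff : (if mode = "scale" then (1:Int) else if mode = "arpeggio" then 3 else 2)
        = (if mode = "scale" then (1:Int) else if mode = "pentatonic" then 2 else 3) := by
      rcases hm with h | h | ⟨h, _⟩ <;> subst h <;> decide
    rw [hoff]
    obtain ⟨h0, t, rfl⟩ : ∃ h0 t, vec = h0 :: t := by
      cases vec with | nil => exact absurd rfl hv | cons h0 t => exact ⟨h0, t, rfl⟩
    have hst : (h0 :: t).foldl (bStep transform) ⟨none, PySem.Set.empty, none, none, 0, 0⟩
        = canonState (if transform = "pitch" then some (pitchLast h0 t) else none)
            (if transform = "pitch" then diffs h0 t else h0 :: t) := by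
      rw [← canon_init]
      by_cases hp : transform = "pitch"
      · subst hp
        have h1 : bStep "pitch" (canonState none []) h0 = canonState (some h0) [] := by
          simp [bStep, canonState]
        simp only [List.foldl_cons, h1]
        rw [foldl_canon_pitch]
        simp
      · rw [foldl_canon_ne_pitch transform hp]
        simp [hp]
    rw [hst]
    have hdiff : pyDiffA (h0 :: t) = diffs h0 t := by
      rw [pyDiffA_eq_zip, diffs_eq_zip]
      simp
    rw [hdiff]
    simp only [canonState]
    generalize (if transform = "pitch" then diffs h0 t else h0 :: t) = ivs
    generalize hoffg : (if mode = "scale" then (1:Int) else if mode = "pentatonic" then 2 else 3) = off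
    by_cases hnil : ivs = []
    · subst hnil
      simp only [List.map_nil, List.length_nil, List.countP_nil]
      cases directed <;> rfl
    · have hnz : ivs.length ≠ 0 := by simpa [List.length_eq_zero_iff] using hnil
      have hanil : ivs.map (fun v => |v|) ≠ [] := by simpa using hnil
      have hiff := (scan_iff_eq_range (ivs.map (fun v => |v|)) off).trans
        (range_iff_minmax (ivs.map (fun v => |v|)) off hanil)
      by_cases hscan : ((PySem.List.enumerate (PySem.List.sorted (PySem.Set.ofList (ivs.map (fun v => |v|))) (fun x => x) false) 0).any
          (fun p => decide (p.2 ≠ p.1 + off)) = true)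
      · have hBpos : ivs.length ≠ 0 ∧ ((ivs.map (fun v => |v|)).min? ≠ some off ∨
            ((ivs.map (fun v => |v|)).max?).getD 0 - ((ivs.map (fun v => |v|)).min?).getD 0 + 1
              ≠ ((PySem.Set.ofList (ivs.map (fun v => |v|))).length : Int)) := by
          refine ⟨hnz, ?_⟩
          by_contra hc
          push_neg at hc
          rw [hiff.mpr hc] at hscan
          exact Bool.false_ne_true hscan
        rw [if_pos hscan, if_pos hBpos]
      · have hfalse := eq_false_of_ne_true hscan
        obtain ⟨hmin, harith⟩ := hiff.mp hfalse
        have hBcond : ¬ (ivs.length ≠ 0 ∧ ((ivs.map (fun v => |v|)).min? ≠ some off ∨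
            ((ivs.map (fun v => |v|)).max?).getD 0 - ((ivs.map (fun v => |v|)).min?).getD 0 + 1
              ≠ ((PySem.Set.ofList (ivs.map (fun v => |v|))).length : Int))) := by
          rintro ⟨-, hbad⟩
          rcases hbad with h | h
          · exact h hmin
          · exact h harith
        rw [if_neg hscan, if_neg hBcond]
        cases directed with
        | false => rfl
        | true =>
          simp only [reduceIte]
          rw [sum_signs]
          have hple : ivs.countP (fun k => decide (0 ≤ k)) ≤ ivs.length :=
            List.countP_le_length
          by_cases hcond : (ivs.countP (fun k => decide (0 ≤ k)) = ivs.length ∨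
              ivs.countP (fun k => decide (0 ≤ k)) = 0)
          · have hA : ¬ ((2 * (ivs.countP (fun k => decide (0 ≤ k)) : Int)
                - (ivs.length : Int)).natAbs ≠ ivs.length) := by
              rcases hcond with h | h <;> omega
            rw [if_neg hA]
            exact (decide_eq_true hcond).symm
          · have hc2 : ivs.countP (fun k => decide (0 ≤ k)) ≠ ivs.length ∧
                ivs.countP (fun k => decide (0 ≤ k)) ≠ 0 := by push_neg at hcond; exact hcond
            have hA : ((2 * (ivs.countP (fun k => decide (0 ≤ k)) : Int)
                - (ivs.length : Int)).natAbs ≠ ivs.length) := by omega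
            rw [if_pos hA]
            exact (decide_eq_false hcond).symm
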